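-- pv_equiv track=rewrite | github.com/lemoz/darwin-godel-machine | agent/solution.py | reverse_with_numbers
-- ===== SOURCE A (Python) =====
-- def reverse_with_numbers(s):
--     """
--     Takes a string and returns a new string where all alphabetic characters
--     are reversed, but numeric characters remain in their original positions.
--     """
--     # Convert string to list for easier manipulation
--     chars = list(s)
--
--     # Extract only alphabetic characters
--     alpha_chars = [c for c in s if c.isalpha()]
--
--     # Reverse the alphabetic characters
--     alpha_chars.reverse()
--
--     # Replace alphabetic characters in original positions with reversed ones
--     alpha_index = 0
--     for i in range(len(chars)):
--         if chars[i].isalpha():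
--             chars[i] = alpha_chars[alpha_index]
--             alpha_index += 1
--
--     return ''.join(chars)
-- ===== SOURCE B (Python) =====
-- def reverse_with_numbers(s):
--     """Two-pointer in-place swap: walk l from the left and r from the right,
--     skipping non-alphabetic characters, swapping alphabetic pairs."""
--     chars = list(s)
--     l, r = 0, len(chars) - 1
--     while l < r:
--         if not chars[l].isalpha():
--             l += 1
--         elif not chars[r].isalpha():
--             r -= 1
--         else:
--             chars[l], chars[r] = chars[r], chars[l]
--             l += 1
--             r -= 1
--     return ''.join(chars)
-- ===== Notes on version B (the rewrite author's own statement) =====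
-- stated objective: alternative
-- what changed: B replaces A's extract-reverse-reinsert three-pass scheme (auxiliary reversed alpha list plus a reinsertion index) with a single converging two-pointer pass that swaps alphabetic characters in place.
import Mathlib
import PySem

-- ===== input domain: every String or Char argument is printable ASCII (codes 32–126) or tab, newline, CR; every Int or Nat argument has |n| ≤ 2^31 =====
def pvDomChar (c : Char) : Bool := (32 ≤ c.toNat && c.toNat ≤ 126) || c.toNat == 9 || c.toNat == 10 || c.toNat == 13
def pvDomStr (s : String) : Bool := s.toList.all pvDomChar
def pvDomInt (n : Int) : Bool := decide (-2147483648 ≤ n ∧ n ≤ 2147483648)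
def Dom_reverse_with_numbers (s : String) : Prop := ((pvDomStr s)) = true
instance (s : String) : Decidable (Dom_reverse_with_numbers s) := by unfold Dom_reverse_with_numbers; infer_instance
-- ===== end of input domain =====

-- B replaces A's extract/reverse/reinsert passes by one converging two-pointer swap pass (alternative, same O(n) cost).

-- ===== PORT A =====
-- A's reinsertion loop: walk the characters, consuming the reversed alpha list
-- (alpha_index advancing = taking the head); the [] branch is unreachable in A's use.
def mergeA : List Char → List Char → List Char
  | [], _ => []
  | c :: cs, st =>
    if PySem.Chars.isalpha c then
      match st with
      | a :: st' => a :: mergeA cs st'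
      | [] => c :: mergeA cs []
    else c :: mergeA cs st

def reverse_with_numbers (s : String) : String :=
  let chars := s.toList
  let alpha_chars := chars.filter PySem.Chars.isalpha
  String.ofList (mergeA chars alpha_chars.reverse)

-- ===== PORT B =====
-- B's while loop: two indices converging, swapping alpha chars in place.
def bLoop (chars : List Char) (l r : Nat) : List Char :=
  if _h : l < r then
    if ¬ PySem.Chars.isalpha (chars.getD l ' ') then bLoop chars (l + 1) r
    else if ¬ PySem.Chars.isalpha (chars.getD r ' ') then bLoop chars l (r - 1)
    else bLoop ((chars.set l (chars.getD r ' ')).set r (chars.getD l ' ')) (l + 1) (r - 1)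
  else chars
termination_by r - l
decreasing_by all_goals omega

def reverse_with_numbers_alt (s : String) : String :=
  String.ofList (bLoop s.toList 0 (s.toList.length - 1))

-- ===== PRECONDITION & SPEC =====
def Spec_reverse_with_numbers (s : String) (out : String) : Prop := out = reverse_with_numbers_alt s
instance (s : String) (out : String) : Decidable (Spec_reverse_with_numbers s out) := by unfold Spec_reverse_with_numbers; infer_instance

-- ===== CLAIM (what is proved, stated in full; the proofs are below) =====
def Claim_equal_reverse_with_numbers : Prop := ∀ (s : String), Dom_reverse_with_numbers s → Spec_reverse_with_numbers s (reverse_with_numbers s)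

-- ===== LEMMAS AND PROOFS =====

-- A's whole computation on a char list.
def M (xs : List Char) : List Char := mergeA xs ((xs.filter PySem.Chars.isalpha).reverse)

theorem mergeA_append (ys zs st : List Char) :
    mergeA (ys ++ zs) st = mergeA ys st ++ mergeA zs (st.drop (ys.countP PySem.Chars.isalpha)) := by
  induction ys generalizing st with
  | nil => simp [mergeA]
  | cons y ys ih =>
    by_cases hy : PySem.Chars.isalpha y
    · cases st with
      | nil => simp [mergeA, hy, ih]
      | cons a st' => simp [mergeA, hy, ih, List.drop_succ_cons]
    · simp [mergeA, hy, ih]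

theorem mergeA_stack_append (ys st ex : List Char) (h : ys.countP PySem.Chars.isalpha ≤ st.length) :
    mergeA ys (st ++ ex) = mergeA ys st := by
  induction ys generalizing st with
  | nil => simp [mergeA]
  | cons y ys ih =>
    by_cases hy : PySem.Chars.isalpha y
    · cases st with
      | nil => simp [hy] at h
      | cons a st' =>
        simp only [List.countP_cons, hy, if_pos, List.length_cons] at h
        simp [mergeA, hy, ih st' (by omega)]
    · simp only [List.countP_cons, hy] at h
      simp [mergeA, hy, ih st (by simpa using h)]

theorem M_nil : M [] = [] := rfl

theorem M_single (c : Char) : M [c] = [c] := by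
  by_cases h : PySem.Chars.isalpha c <;> simp [M, mergeA, h]

theorem M_cons_not (c : Char) (t : List Char) (h : ¬ PySem.Chars.isalpha c) :
    M (c :: t) = c :: M t := by
  simp [M, mergeA, h]

theorem M_snoc_not (ys : List Char) (d : Char) (h : ¬ PySem.Chars.isalpha d) :
    M (ys ++ [d]) = M ys ++ [d] := by
  simp [M, List.filter_append, h, mergeA_append, mergeA]

theorem M_both (c d : Char) (mid : List Char)
    (hc : PySem.Chars.isalpha c) (hd : PySem.Chars.isalpha d) :
    M (c :: (mid ++ [d])) = d :: M mid ++ [c] := by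
  have hlen : ((mid.filter PySem.Chars.isalpha).reverse).length = mid.countP PySem.Chars.isalpha := by
    simp [List.countP_eq_length_filter]
  have hstk : mergeA mid ((mid.filter PySem.Chars.isalpha).reverse ++ [c])
      = mergeA mid ((mid.filter PySem.Chars.isalpha).reverse) :=
    mergeA_stack_append _ _ _ (by omega)
  have hdrop : ((mid.filter PySem.Chars.isalpha).reverse ++ [c]).drop (mid.countP PySem.Chars.isalpha) = [c] := by
    rw [← hlen, List.drop_left]
  have hfil : ((c :: (mid ++ [d])).filter PySem.Chars.isalpha).reverse
      = d :: ((mid.filter PySem.Chars.isalpha).reverse ++ [c]) := by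
    simp [List.filter_append, hc, hd]
  unfold M
  rw [hfil]
  simp only [mergeA, hc, if_pos]
  rw [mergeA_append, hdrop, hstk]
  simp [mergeA, hd]

theorem getD_at_length {α : Type} (xs ys : List α) (a d : α) :
    (xs ++ a :: ys).getD xs.length d = a := by
  induction xs with
  | nil => rfl
  | cons x xs ih => simpa using ih

theorem set_at_length {α : Type} (xs ys : List α) (a b : α) :
    (xs ++ a :: ys).set xs.length b = xs ++ b :: ys := by
  induction xs with
  | nil => rfl
  | cons x xs ih => simpa using ih

theorem bLoop_seg : ∀ (n : Nat) (pre seg suf : List Char), seg.length = n →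
    bLoop (pre ++ seg ++ suf) pre.length (pre.length + seg.length - 1) = pre ++ M seg ++ suf := by
  intro n
  induction n using Nat.strong_induction_on with
  | _ n ih =>
    intro pre seg suf hn
    by_cases hsmall : seg.length ≤ 1
    · rw [bLoop, dif_neg (by omega)]
      match seg, hsmall with
      | [], _ => simp [M_nil]
      | [c], _ => simp [M_single]
    · -- seg has length ≥ 2: seg = c :: mid ++ [d]
      obtain ⟨c, rest, rfl⟩ : ∃ c rest, seg = c :: rest := by
        cases seg with
        | nil => simp at hsmall
        | cons c r => exact ⟨c, r, rfl⟩
      have hrest : rest ≠ [] := by intro h; simp [h] at hsmall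
      obtain ⟨mid, d, rfl⟩ : ∃ mid d, rest = mid ++ [d] :=
        ⟨rest.dropLast, rest.getLast hrest, (List.dropLast_append_getLast hrest).symm⟩
      have hn2 : n = mid.length + 2 := by
        simp only [List.length_cons, List.length_append, List.length_nil] at hn; omega
      have hE : pre ++ (c :: (mid ++ [d])) ++ suf = pre ++ c :: (mid ++ d :: suf) := by simp
      have hr : pre.length + (c :: (mid ++ [d])).length - 1 = (pre ++ c :: mid).length := by
        simp only [List.length_cons, List.length_append, List.length_nil]; omega
      have hgl : (pre ++ c :: (mid ++ d :: suf)).getD pre.length ' ' = c := getD_at_length _ _ _ _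
      have hgr : (pre ++ c :: (mid ++ d :: suf)).getD (pre ++ c :: mid).length ' ' = d := by
        have h2 : pre ++ c :: (mid ++ d :: suf) = (pre ++ c :: mid) ++ d :: suf := by simp
        rw [h2, getD_at_length]
      rw [hE, bLoop, hr, dif_pos (by simp only [List.length_append, List.length_cons]; omega),
        hgl, hgr]
      by_cases hc : PySem.Chars.isalpha c
      · by_cases hd : PySem.Chars.isalpha d
        · -- swap branch
          simp only [hc, hd, not_true_eq_false, if_false]
          have hset : ((pre ++ c :: (mid ++ d :: suf)).set pre.length d).set
              (pre ++ c :: mid).length c = (pre ++ [d]) ++ mid ++ c :: suf := by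
            rw [set_at_length]
            have h3 : pre ++ d :: (mid ++ d :: suf) = (pre ++ d :: mid) ++ d :: suf := by simp
            have h4 : (pre ++ c :: mid).length = (pre ++ d :: mid).length := by simp
            rw [h3, h4, set_at_length]
            simp
          rw [hset]
          have harg1 : pre.length + 1 = (pre ++ [d]).length := by simp
          have harg2 : (pre ++ c :: mid).length - 1 = (pre ++ [d]).length + mid.length - 1 := by
            simp only [List.length_append, List.length_cons, List.length_nil]; omega
          rw [harg1, harg2, ih mid.length (by omega) (pre ++ [d]) mid (c :: suf) rfl]
          rw [M_both c d mid hc hd]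
          simp
        · -- retreat r
          simp only [hc, hd, not_true_eq_false, if_false]
          have harg : (pre ++ c :: mid).length - 1 = pre.length + (c :: mid).length - 1 := by
            simp only [List.length_append, List.length_cons]
          have hE2 : pre ++ c :: (mid ++ d :: suf) = pre ++ (c :: mid) ++ (d :: suf) := by simp
          rw [harg, hE2, ih (c :: mid).length (by simp only [List.length_cons]; omega)
            pre (c :: mid) (d :: suf) rfl]
          have hM : M (c :: (mid ++ [d])) = M (c :: mid) ++ [d] := by
            simpa using M_snoc_not (c :: mid) d hd
          rw [hM]
          simp
      · -- advance l
        simp only [hc]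
        have hE2 : pre ++ c :: (mid ++ d :: suf) = (pre ++ [c]) ++ (mid ++ [d]) ++ suf := by simp
        have harg1 : pre.length + 1 = (pre ++ [c]).length := by simp
        have harg2 : (pre ++ c :: mid).length = (pre ++ [c]).length + (mid ++ [d]).length - 1 := by
          simp only [List.length_append, List.length_cons, List.length_nil]; omega
        rw [hE2, harg1, harg2, ih (mid ++ [d]).length
          (by simp only [List.length_append, List.length_nil, List.length_cons]; omega)
          (pre ++ [c]) (mid ++ [d]) suf rfl]
        rw [M_cons_not c (mid ++ [d]) hc]
        simp

-- ===== VERDICT (by name: the statement is the Claim_ definition above) =====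
theorem reverse_with_numbers_spec : Claim_equal_reverse_with_numbers := by
  intro s _
  unfold Spec_reverse_with_numbers reverse_with_numbers reverse_with_numbers_alt
  have := bLoop_seg s.toList.length [] s.toList [] rfl
  simp only [List.nil_append, List.append_nil, List.length_nil, Nat.zero_add] at this
  rw [this]
  rfl
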